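-- pv_equiv track=rewrite | github.com/cn-uofbasel/PyCN-lite | icn/lib/suite/ccnx2015_enc.py | prepend_int
-- ===== SOURCE A (Python) =====
-- def prepend_int(buf, start, v): # returns new start
--     while True:
--         start -= 1
--         buf[start] = v & 0x0ff
--         v >>= 8
--         if v == 0:
--             break
--     return start
-- ===== SOURCE B (Python) =====
-- def prepend_int(buf, start, v):  # returns new start
--     n = max(1, (v.bit_length() + 7) // 8)
--     new = start - n
--     for i, byte in enumerate(v.to_bytes(n, 'big')):
--         buf[new + i] = byte
--     return new
-- ===== Notes on version B (the rewrite author's own statement) =====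
-- stated objective: simpler
-- what changed: Replaces A's byte-by-byte shift-and-test loop with a closed-form byte count n = max(1,(v.bit_length()+7)//8), computing the new start arithmetically and writing v.to_bytes(n,'big') into the buffer instead of shifting v eight bits per iteration.
import Mathlib
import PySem

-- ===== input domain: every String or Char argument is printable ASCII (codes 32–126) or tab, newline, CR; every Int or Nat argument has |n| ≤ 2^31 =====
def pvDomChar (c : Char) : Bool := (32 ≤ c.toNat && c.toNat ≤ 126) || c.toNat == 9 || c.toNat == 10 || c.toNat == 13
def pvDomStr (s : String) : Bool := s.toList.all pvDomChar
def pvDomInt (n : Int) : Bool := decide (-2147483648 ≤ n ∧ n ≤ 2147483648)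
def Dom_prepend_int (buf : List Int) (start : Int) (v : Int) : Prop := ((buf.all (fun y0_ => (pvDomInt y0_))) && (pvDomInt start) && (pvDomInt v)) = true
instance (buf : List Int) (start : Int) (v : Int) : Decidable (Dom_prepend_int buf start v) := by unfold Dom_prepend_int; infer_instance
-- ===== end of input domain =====

-- B replaces A's shift-loop iteration count by a closed-form byte count from v.bit_length()
-- and writes the big-endian bytes of v directly (objective: simpler). Both Pythons mutate
-- buf in place; the equivalence proved here is about the RETURN value only (the written
-- bytes coincide whenever start - n ≥ 0, i.e. without negative-index wraparound).

-- ===== PORT A =====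
-- A's while-loop: one fuel unit per iteration; within Pre_ (0 ≤ v ≤ 2^31) at most 4
-- iterations happen, so fuel 64 is never exhausted there (the fuel is only a totality guard).
def pvALoop : Nat → Int → Int → Int
  | 0, start, _ => start - 1
  | fuel + 1, start, v =>
      let start' := start - 1
      let v' := PySem.Int.floordiv v 256   -- v >>= 8, Python arithmetic shift
      if v' = 0 then start' else pvALoop fuel start' v'

def prepend_int (_buf : List Int) (start : Int) (v : Int) : Int :=
  pvALoop 64 start v

-- ===== PORT B =====
-- Source B: n = max(1,(bit_length+7)//8); new = start - n; the for-loop over to_bytes only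
-- mutates buf (not represented: the buffer is not returned); the return value is new.
def prepend_int_alt (_buf : List Int) (start : Int) (v : Int) : Int :=
  let n : Int := max 1 (PySem.Int.floordiv ((PySem.Int.bitLength v : Int) + 7) 8)
  start - n

-- ===== PRECONDITION & SPEC =====
-- byte count of v, used only to state which buffer indices A writes (Pre_'s own helper;
-- the comparison chain is exact for v < 2^40, which covers the whole domain Dom_)
def pvNBytes (v : Int) : Int :=
  if v < 256 then 1 else if v < 65536 then 2 else if v < 16777216 then 3
  else if v < 4294967296 then 4 else 5

-- Pre_ excludes v < 0 (A's loop never terminates there: v >>= 8 stays at -1) and the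
-- inputs where a written index start-1 … start-n falls outside [-len(buf), len(buf)-1],
-- on which A raises IndexError.
def Pre_prepend_int (buf : List Int) (start : Int) (v : Int) : Prop :=
  0 ≤ v ∧ -(buf.length : Int) ≤ start - pvNBytes v ∧ start ≤ (buf.length : Int)
instance (buf : List Int) (start : Int) (v : Int) : Decidable (Pre_prepend_int buf start v) := by
  unfold Pre_prepend_int; infer_instance

def pvWitness_prepend_int : List Int × Int × Int := ([0, 0, 0, 0], 4, 300)

def Spec_prepend_int (buf : List Int) (start : Int) (v : Int) (out : Int) : Prop := out = prepend_int_alt buf start v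
instance (buf : List Int) (start : Int) (v : Int) (out : Int) : Decidable (Spec_prepend_int buf start v out) := by unfold Spec_prepend_int; infer_instance

-- ===== CLAIM (what is proved, stated in full; the proofs are below) =====
def Claim_equal_prepend_int : Prop := ∀ (buf : List Int) (start : Int) (v : Int), Dom_prepend_int buf start v → Pre_prepend_int buf start v → Spec_prepend_int buf start v (prepend_int buf start v)

-- ===== LEMMAS AND PROOFS =====

-- byte count on Nat, matching B's formula through the casts
def pvNB (m : Nat) : Nat := max 1 ((PySem.Int.bitLength (m : Int) + 7) / 8)

theorem pvBL_ge (m : Nat) (h : 256 ≤ m) : 9 ≤ PySem.Int.bitLength (m : Int) := by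
  by_contra hlt
  have h1 : m < 2 ^ PySem.Int.bitLength (m : Int) := by
    simpa using PySem.Int.lt_two_pow_bitLength (m : Int)
  have h2 : 2 ^ PySem.Int.bitLength (m : Int) ≤ 2 ^ 8 :=
    Nat.pow_le_pow_right (by norm_num) (by omega)
  omega

theorem pvBL_le (m : Nat) (h : m < 256) (hm : 0 < m) : PySem.Int.bitLength (m : Int) ≤ 8 := by
  by_contra hgt
  have h1 : 2 ^ (PySem.Int.bitLength (m : Int) - 1) ≤ m := by
    simpa using PySem.Int.two_pow_bitLength_le (m : Int) (by exact_mod_cast hm.ne')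
  have h2 : 2 ^ 8 ≤ 2 ^ (PySem.Int.bitLength (m : Int) - 1) :=
    Nat.pow_le_pow_right (by norm_num) (by omega)
  omega

theorem pvBL_div256 (m : Nat) (h : 256 ≤ m) :
    PySem.Int.bitLength ((m / 256 : Nat) : Int) = PySem.Int.bitLength (m : Int) - 8 := by
  have step : ∀ k : Nat, 0 < k →
      PySem.Int.bitLength (k : Int) = PySem.Int.bitLength ((k / 2 : Nat) : Int) + 1 :=
    fun k hk => PySem.Int.bitLength_natCast (m := k) hk
  have e1 := step m (by omega)
  have e2 := step (m / 2) (by omega)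
  have e3 := step (m / 2 / 2) (by omega)
  have e4 := step (m / 2 / 2 / 2) (by omega)
  have e5 := step (m / 2 / 2 / 2 / 2) (by omega)
  have e6 := step (m / 2 / 2 / 2 / 2 / 2) (by omega)
  have e7 := step (m / 2 / 2 / 2 / 2 / 2 / 2) (by omega)
  have e8 := step (m / 2 / 2 / 2 / 2 / 2 / 2 / 2) (by omega)
  have hd : m / 2 / 2 / 2 / 2 / 2 / 2 / 2 / 2 = m / 256 := by omega
  rw [hd] at e8
  omega

theorem pvNB_div256 (m : Nat) (h : 256 ≤ m) : pvNB (m / 256) + 1 = pvNB m := by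
  have h9 := pvBL_ge m h
  have hd := pvBL_div256 m h
  unfold pvNB
  omega

theorem pvNB_small (m : Nat) (h : m < 256) : pvNB m = 1 := by
  rcases Nat.eq_zero_or_pos m with hz | hp
  · subst hz; decide
  · have := pvBL_le m h hp
    unfold pvNB
    omega

theorem pvALoop_eq (fuel : Nat) : ∀ (m : Nat) (start : Int), m < 256 ^ fuel →
    pvALoop fuel start (m : Int) = start - (pvNB m : Int) := by
  induction fuel with
  | zero =>
      intro m start hm
      interval_cases m
      simp [pvALoop, pvNB, PySem.Int.bitLength_zero]
  | succ fuel ih =>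
      intro m start hm
      have hfd : PySem.Int.floordiv (m : Int) 256 = ((m / 256 : Nat) : Int) := by
        exact_mod_cast PySem.Int.floordiv_natCast m 256
      have hdef : pvALoop (fuel + 1) start (m : Int)
          = if PySem.Int.floordiv (m : Int) 256 = 0 then start - 1
            else pvALoop fuel (start - 1) (PySem.Int.floordiv (m : Int) 256) := rfl
      rw [hdef, hfd]
      by_cases hlt : m < 256
      · have hz : m / 256 = 0 := Nat.div_eq_of_lt hlt
        rw [hz]
        simp [pvNB_small m hlt]
      · have hnz : ((m / 256 : Nat) : Int) ≠ 0 := by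
          exact_mod_cast (by omega : m / 256 ≠ 0)
        have hrec : m / 256 < 256 ^ fuel := by
          rw [Nat.div_lt_iff_lt_mul (by norm_num)]
          calc m < 256 ^ (fuel + 1) := hm
            _ = 256 ^ fuel * 256 := by ring
        rw [if_neg hnz, ih (m / 256) (start - 1) hrec, ← pvNB_div256 m (by omega)]
        push_cast
        ring

-- ===== VERDICT (by name: the statement is the Claim_ definition above) =====
theorem prepend_int_spec : Claim_equal_prepend_int := by
  intro buf start v hDom hPre
  obtain ⟨hv, _, _⟩ := hPre
  have hDomv : v ≤ 2147483648 := by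
    unfold Dom_prepend_int at hDom
    simp [pvDomInt] at hDom
    exact hDom.2.2
  have hm : v = ((v.toNat : Nat) : Int) := by omega
  have hbound : v.toNat < 256 ^ 64 := by
    have h4 : v.toNat < 256 ^ 4 := by
      have : (256 : Nat) ^ 4 = 4294967296 := by norm_num
      omega
    have hle : (256 : Nat) ^ 4 ≤ 256 ^ 64 := Nat.pow_le_pow_right (by norm_num) (by norm_num)
    omega
  show prepend_int buf start v = prepend_int_alt buf start v
  unfold prepend_int prepend_int_alt
  rw [hm, pvALoop_eq 64 v.toNat start hbound]
  have hfd : PySem.Int.floordiv ((PySem.Int.bitLength ((v.toNat : Nat) : Int) : Int) + 7) 8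
      = (((PySem.Int.bitLength ((v.toNat : Nat) : Int) + 7) / 8 : Nat) : Int) := by
    have := PySem.Int.floordiv_natCast (PySem.Int.bitLength ((v.toNat : Nat) : Int) + 7) 8
    rw [← this]
    push_cast
    ring_nf
  simp only [hfd, pvNB]
  push_cast [Nat.cast_max]
  ring_nf
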